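-- pv_equiv track=rewrite | github.com/MForofontov/python-utils | iterable_functions/partially_contains_fragment_of_list.py | partially_contains_fragment_of_list
-- ===== SOURCE A (Python) =====
-- from typing import Any
--
-- def partially_contains_fragment_of_list(
--     target_list: list[Any], list_of_lists: list[list[Any]]
-- ) -> bool:
--     """
--     Check if the target_list is contained inside sublist even if it partially.
--     e.g partially_contains_fragment_of_list(['a', 'b'], [['a', 'b', 'c'], ['d', 'e']])
--     returns True.
--
--     Parameters
--     ----------
--     target_list : list
--         List to find inside the list_of_lists.
--     list_of_lists : list
--         The nested list.
--
--     Returns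
--     -------
--     bool
--         True if contains False if not.
--
--     Raises
--     ------
--     TypeError
--         If target_list is not a list or list_of_lists is not a list of lists.
--     """
--     if not isinstance(target_list, list):
--         raise TypeError("target_list must be a list")
--     if not isinstance(list_of_lists, list) or not all(
--         isinstance(sublist, list) for sublist in list_of_lists
--     ):
--         raise TypeError("list_of_lists must be a list of lists")
--
--     for sub in list_of_lists:
--         if any(
--             sub[i : i + len(target_list)] == target_list
--             for i in range(len(sub) - len(target_list) + 1)
--         ):
--             return True
--     return False
-- ===== SOURCE B (Python) =====
-- def partially_contains_fragment_of_list(target_list, list_of_lists):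
--     if not isinstance(target_list, list):
--         raise TypeError("target_list must be a list")
--     if not isinstance(list_of_lists, list) or not all(
--         isinstance(sublist, list) for sublist in list_of_lists
--     ):
--         raise TypeError("list_of_lists must be a list of lists")
--
--     n = len(target_list)
--     target_fp = sum(_fp(x) for x in target_list)
--     for sub in list_of_lists:
--         if len(sub) < n:
--             continue
--         fps = [_fp(x) for x in sub]
--         # prefix sums of element fingerprints: window sum in O(1) per offset
--         total = 0
--         prefix = [0]
--         for f in fps:
--             total += f
--             prefix.append(total)
--         for i in range(len(sub) - n + 1):
--             # cheap fingerprint filter; verify only on a fingerprint hit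
--             if prefix[i + n] - prefix[i] == target_fp and sub[i:i + n] == target_list:
--                 return True
--     return False
--
--
-- def _fp(x):
--     s = x if isinstance(x, str) else repr(x)
--     h = 0
--     for ch in s:
--         h = h * 131 + ord(ch)
--     return h
-- ===== Notes on version B (the rewrite author's own statement) =====
-- stated objective: alternative
-- what changed: Replaces A's slice-and-compare at every offset with a Rabin-Karp-style fingerprint filter: per-element fingerprints and their prefix sums are built once per sublist so each window is first checked by an O(1) fingerprint difference, and the full slice comparison runs only on a fingerprint hit; this trades A's per-offset slice allocations for an up-front fingerprinting pass (a higher constant factor on short elements).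
import Mathlib
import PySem

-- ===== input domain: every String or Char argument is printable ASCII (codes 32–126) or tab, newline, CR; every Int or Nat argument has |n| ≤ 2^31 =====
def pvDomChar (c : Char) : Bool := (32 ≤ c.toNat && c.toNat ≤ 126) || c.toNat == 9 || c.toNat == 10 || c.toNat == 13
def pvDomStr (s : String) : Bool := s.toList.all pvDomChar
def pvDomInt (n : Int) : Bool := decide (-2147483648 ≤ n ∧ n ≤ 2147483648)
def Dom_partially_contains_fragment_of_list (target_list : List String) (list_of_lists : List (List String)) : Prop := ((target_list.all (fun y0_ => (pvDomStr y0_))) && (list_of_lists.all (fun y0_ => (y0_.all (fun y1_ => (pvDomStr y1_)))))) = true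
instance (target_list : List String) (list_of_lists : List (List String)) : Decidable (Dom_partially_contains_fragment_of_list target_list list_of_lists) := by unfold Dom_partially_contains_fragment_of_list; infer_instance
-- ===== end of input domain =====

-- B replaces A's slice-per-offset scan with a Rabin–Karp-style fingerprint filter: element
-- fingerprints and their prefix sums are precomputed once per sublist, each window is first
-- compared by an O(1) fingerprint difference, and the slice comparison runs only on a
-- fingerprint hit (objective: alternative; correctness is unaffected because a real match
-- always has a matching fingerprint).

-- ===== PORT A =====
-- for sub in list_of_lists: if any(sub[i:i+len(t)] == t for i in range(len(sub)-len(t)+1)): return True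
def partially_contains_fragment_of_list (target_list : List String) (list_of_lists : List (List String)) : Bool :=
  list_of_lists.any (fun sub =>
    (PySem.List.pyRange 0 ((sub.length : Int) - (target_list.length : Int) + 1) 1).any
      (fun i => PySem.List.slice sub (some i) (some (i + (target_list.length : Int))) == target_list))

-- ===== PORT B =====
-- _fp(x): h = 0; for ch in s: h = h*131 + ord(ch)  (on the ASCII domain x is a str)
def pcfFp (s : String) : Int :=
  s.toList.foldl (fun h c => h * 131 + (c.toNat : Int)) 0

-- total = 0; prefix = [0]; for f in fps: total += f; prefix.append(total)
def pcfPrefix (fps : List Int) : List Int :=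
  (fps.foldl (fun st f => (st.1 + f, st.2 ++ [st.1 + f])) ((0 : Int), [(0 : Int)])).2

def partially_contains_fragment_of_list_alt (target_list : List String) (list_of_lists : List (List String)) : Bool :=
  let n := target_list.length
  let tfp := (target_list.map pcfFp).sum
  list_of_lists.any (fun sub =>
    if sub.length < n then false
    else
      let pre := pcfPrefix (sub.map pcfFp)
      (List.range (sub.length - n + 1)).any (fun i =>
        (pre.getD (i + n) 0 - pre.getD i 0 == tfp) && ((sub.drop i).take n == target_list)))

-- ===== PRECONDITION & SPEC =====
def Spec_partially_contains_fragment_of_list (target_list : List String) (list_of_lists : List (List String)) (out : Bool) : Prop := out = partially_contains_fragment_of_list_alt target_list list_of_lists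
instance (target_list : List String) (list_of_lists : List (List String)) (out : Bool) : Decidable (Spec_partially_contains_fragment_of_list target_list list_of_lists out) := by unfold Spec_partially_contains_fragment_of_list; infer_instance

-- ===== CLAIM (what is proved, stated in full; the proofs are below) =====
def Claim_equal_partially_contains_fragment_of_list : Prop := ∀ (target_list : List String) (list_of_lists : List (List String)), Dom_partially_contains_fragment_of_list target_list list_of_lists → Spec_partially_contains_fragment_of_list target_list list_of_lists (partially_contains_fragment_of_list target_list list_of_lists)

-- ===== LEMMAS AND PROOFS =====

-- the prefix-building fold, fully characterised
theorem pcfPrefix_fold (fps : List Int) (t : Int) (acc : List Int) :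
    (fps.foldl (fun st f => (st.1 + f, st.2 ++ [st.1 + f])) (t, acc)).2
      = acc ++ (List.range fps.length).map (fun k => t + (fps.take (k + 1)).sum) := by
  induction fps generalizing t acc with
  | nil => simp
  | cons f r ih =>
    simp only [List.foldl_cons, ih, List.append_assoc, List.length_cons, List.range_succ_eq_map]
    simp [List.map_map, Function.comp, add_assoc]

-- prefix[k] is the sum of the first k fingerprints
theorem pcfPrefix_getD (fps : List Int) (k : Nat) (hk : k ≤ fps.length) :
    (pcfPrefix fps).getD k 0 = (fps.take k).sum := by
  unfold pcfPrefix
  rw [pcfPrefix_fold]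
  cases k with
  | zero => simp
  | succ k =>
    simp only [List.singleton_append, List.getD, List.getElem?_cons_succ]
    rw [List.getElem?_map, List.getElem?_range (by omega)]
    simp

-- the fingerprint of the window at offset i is the prefix-sum difference
theorem window_fp (sub : List String) (i n : Nat) (h : i + n ≤ sub.length) :
    (pcfPrefix (sub.map pcfFp)).getD (i + n) 0 - (pcfPrefix (sub.map pcfFp)).getD i 0
      = (((sub.drop i).take n).map pcfFp).sum := by
  rw [pcfPrefix_getD _ _ (by simpa using h), pcfPrefix_getD _ _ (by simp; omega),
    List.take_add, List.sum_append]
  simp [List.map_take, List.map_drop]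

-- on a true window match the fingerprint filter necessarily fires, so the guarded
-- predicate of B equals A's bare slice comparison
theorem inner_pred_eq (sub tgt : List String) (i : Nat) (hle : i + tgt.length ≤ sub.length) :
    (((pcfPrefix (sub.map pcfFp)).getD (i + tgt.length) 0
        - (pcfPrefix (sub.map pcfFp)).getD i 0 == (tgt.map pcfFp).sum)
      && ((sub.drop i).take tgt.length == tgt))
    = ((sub.drop i).take tgt.length == tgt) := by
  by_cases h : (sub.drop i).take tgt.length = tgt
  · have hfp : (pcfPrefix (sub.map pcfFp)).getD (i + tgt.length) 0
        - (pcfPrefix (sub.map pcfFp)).getD i 0 = (tgt.map pcfFp).sum := by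
      rw [window_fp sub i tgt.length hle, h]
    simp only [List.getD] at hfp
    simp [h, hfp, List.getD]
  · simp [h]

-- per-sublist agreement of A's slice scan with B's filtered scan
theorem sub_agree (sub tgt : List String) :
    ((PySem.List.pyRange 0 ((sub.length : Int) - (tgt.length : Int) + 1) 1).any
      (fun i => PySem.List.slice sub (some i) (some (i + (tgt.length : Int))) == tgt))
    = (if sub.length < tgt.length then false
       else (List.range (sub.length - tgt.length + 1)).any (fun i =>
         ((pcfPrefix (sub.map pcfFp)).getD (i + tgt.length) 0
            - (pcfPrefix (sub.map pcfFp)).getD i 0 == (tgt.map pcfFp).sum)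
         && ((sub.drop i).take tgt.length == tgt))) := by
  rw [Bool.eq_iff_iff, List.any_eq_true]
  by_cases hlt : sub.length < tgt.length
  · rw [if_pos hlt]
    constructor
    · rintro ⟨x, hx, _⟩
      rw [PySem.List.mem_pyRange_one] at hx
      omega
    · intro h; cases h
  · rw [if_neg hlt, List.any_eq_true]
    constructor
    · rintro ⟨x, hx, hP⟩
      rw [PySem.List.mem_pyRange_one] at hx
      obtain ⟨hx0, hxb⟩ := hx
      obtain ⟨i, rfl⟩ := Int.eq_ofNat_of_zero_le hx0
      refine ⟨i, by rw [List.mem_range]; omega, ?_⟩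
      rw [inner_pred_eq sub tgt i (by omega)]
      rwa [PySem.List.slice_natCast_add] at hP
    · rintro ⟨i, hi, hP⟩
      rw [List.mem_range] at hi
      rw [inner_pred_eq sub tgt i (by omega)] at hP
      refine ⟨(i : Int), ?_, ?_⟩
      · rw [PySem.List.mem_pyRange_one]; omega
      · rwa [PySem.List.slice_natCast_add]

-- ===== VERDICT (by name: the statement is the Claim_ definition above) =====
theorem partially_contains_fragment_of_list_spec : Claim_equal_partially_contains_fragment_of_list := by
  intro target_list list_of_lists _
  unfold Spec_partially_contains_fragment_of_list
  unfold partially_contains_fragment_of_list partially_contains_fragment_of_list_alt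
  exact congrArg _ (funext (fun sub => sub_agree sub target_list))
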